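-- pv_equiv track=rewrite | github.com/remoo1901/cs-guided-project-problem-solving | src/demonstration_04.py | emotify
-- ===== SOURCE A (Python) =====
-- def emotify(txt):
--     #n = txt.split()
--     new = ""
--     for i in range(len(txt)):
--         if "smile" in txt:
--            new = txt.replace("smile", ":D")
--         elif "grin" in txt:
--            new = txt.replace("grin", ":)")
--         elif "sad" in txt:
--            new = txt.replace("sad", ":(")
--
--     return new
-- ===== SOURCE B (Python) =====
-- # B: data-driven table of (pattern, emoticon) pairs replacing A's if-elif chain and redundant index loop.
-- PATTERNS = [("smile", ":D"), ("grin", ":)"), ("sad", ":(")]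
--
-- def emotify(txt):
--     for pat, emo in PATTERNS:
--         if pat in txt:
--             return txt.replace(pat, emo)
--     return ""
-- ===== Notes on version B (the rewrite author's own statement) =====
-- stated objective: faster
-- what changed: Replaced A's redundant for-i-in-range(len(txt)) loop that re-runs a hardcoded if-elif chain every iteration with a single data-driven scan over an ordered (pattern, emoticon) table, returning on the first match.
import Mathlib
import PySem

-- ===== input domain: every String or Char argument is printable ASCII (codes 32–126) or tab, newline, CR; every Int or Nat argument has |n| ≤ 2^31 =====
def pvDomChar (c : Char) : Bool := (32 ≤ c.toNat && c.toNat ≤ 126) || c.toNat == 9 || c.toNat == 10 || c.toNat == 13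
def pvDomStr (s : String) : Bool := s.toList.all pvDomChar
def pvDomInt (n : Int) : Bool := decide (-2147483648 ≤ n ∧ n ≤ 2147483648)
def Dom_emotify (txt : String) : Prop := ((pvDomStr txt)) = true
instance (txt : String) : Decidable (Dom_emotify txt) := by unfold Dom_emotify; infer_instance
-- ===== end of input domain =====

-- B replaces A's redundant index loop re-running a hardcoded if-elif chain by one
-- data-driven scan over an ordered (pattern, emoticon) table; same return value everywhere.

-- ===== PORT A =====
-- for i in range(len(txt)): re-evaluates the if-elif chain each iteration, updating `new`
def emotify (txt : String) : String :=
  (List.range txt.toList.length).foldl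
    (fun new _ =>
      if PySem.Str.isIn "smile" txt then PySem.Str.replace txt "smile" ":D"
      else if PySem.Str.isIn "grin" txt then PySem.Str.replace txt "grin" ":)"
      else if PySem.Str.isIn "sad" txt then PySem.Str.replace txt "sad" ":("
      else new) ""

-- ===== PORT B =====
def emotifyTable : List (String × String) := [("smile", ":D"), ("grin", ":)"), ("sad", ":(")]

def emotify_alt (txt : String) : String :=
  match emotifyTable.find? (fun p => PySem.Str.isIn p.1 txt) with
  | some (pat, emo) => PySem.Str.replace txt pat emo
  | none => ""

-- ===== PRECONDITION & SPEC =====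
def Spec_emotify (txt : String) (out : String) : Prop := out = emotify_alt txt
instance (txt : String) (out : String) : Decidable (Spec_emotify txt out) := by unfold Spec_emotify; infer_instance

-- ===== CLAIM (what is proved, stated in full; the proofs are below) =====
def Claim_equal_emotify : Prop := ∀ (txt : String), Dom_emotify txt → Spec_emotify txt (emotify txt)

-- ===== LEMMAS AND PROOFS =====

-- a fold of a constant body is the start value on [] and the constant otherwise
theorem foldl_const {α β : Type} (c a : α) (l : List β) :
    l.foldl (fun _ _ => c) a = if l = [] then a else c := by
  induction l generalizing a with
  | nil => simp
  | cons x xs ih =>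
      rw [List.foldl_cons, ih]
      cases xs <;> simp

-- a nonempty pattern found inside txt forces txt nonempty
theorem ne_nil_of_isIn (sub txt : List Char) (hs : sub ≠ [])
    (h : PySem.Chars.isIn sub txt = true) : txt ≠ [] := by
  rw [PySem.Chars.isIn_iff_infix] at h
  intro hnil
  rw [hnil] at h
  exact hs (List.eq_nil_of_infix_nil h)

-- ===== VERDICT (by name: the statement is the Claim_ definition above) =====
theorem emotify_spec : Claim_equal_emotify := by
  intro txt _
  unfold Spec_emotify emotify emotify_alt emotifyTable
  have hlen : ∀ _ : txt.toList ≠ [], txt.length ≠ 0 := by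
    intro h' hz
    rw [← String.length_toList] at hz
    exact h' (List.eq_nil_of_length_eq_zero hz)
  by_cases h1 : PySem.Chars.isIn ['s','m','i','l','e'] txt.toList = true
  · have hne := hlen (ne_nil_of_isIn _ _ (by decide) h1)
    simp [h1, foldl_const, List.range_eq_nil, List.find?, hne]
  · by_cases h2 : PySem.Chars.isIn ['g','r','i','n'] txt.toList = true
    · have hne := hlen (ne_nil_of_isIn _ _ (by decide) h2)
      simp [h1, h2, foldl_const, List.range_eq_nil, List.find?, hne]
    · by_cases h3 : PySem.Chars.isIn ['s','a','d'] txt.toList = true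
      · have hne := hlen (ne_nil_of_isIn _ _ (by decide) h3)
        simp [h1, h2, h3, foldl_const, List.range_eq_nil, List.find?, hne]
      · simp [h1, h2, h3, List.find?]
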